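-- pv_equiv track=rewrite | github.com/markpernia/PDFGen | PDFGen.py | check_warnings
-- ===== SOURCE A (Python) =====
-- def check_warnings(fig_filename, image_files, file_types):
--     """Check for any warnings based on user selections and collected images."""
--     warnings = []
--
--     # Check for missing .fig file (shouldn't happen after user selection)
--     if not fig_filename:
--         warnings.append("No .fig file found.")
--
--     # Check if no images are found
--     if not image_files:
--         if not file_types:
--             warnings.append("No image file types selected.")
--         else:
--             missing_types = []
--             for ext in file_types:
--                 if not any(img.lower().endswith(ext) for img in image_files):
--                     missing_types.append(ext)
--             if missing_types:
--                 missing_types_str = ', '.join([f"No {ext} files found" for ext in missing_types])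
--                 warnings.append(missing_types_str)
--     else:
--         if not file_types:
--             warnings.append("No image file types selected.")
--
--     return warnings
-- ===== SOURCE B (Python) =====
-- def check_warnings(fig_filename, image_files, file_types):
--     """Check for any warnings based on user selections and collected images."""
--     rules = [
--         (not fig_filename, "No .fig file found."),
--         (not file_types, "No image file types selected."),
--         (bool(file_types) and not image_files,
--          ', '.join(f"No {ext} files found" for ext in file_types)),
--     ]
--     return [msg for cond, msg in rules if cond]
-- ===== Notes on version B (the rewrite author's own statement) =====
-- stated objective: simpler
-- what changed: B replaces A's imperative branch tree with its dead inner any()-scan (which only ever runs over an empty image_files list) by a declarative rule table of (condition, message) pairs filtered in one comprehension.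
import Mathlib
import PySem

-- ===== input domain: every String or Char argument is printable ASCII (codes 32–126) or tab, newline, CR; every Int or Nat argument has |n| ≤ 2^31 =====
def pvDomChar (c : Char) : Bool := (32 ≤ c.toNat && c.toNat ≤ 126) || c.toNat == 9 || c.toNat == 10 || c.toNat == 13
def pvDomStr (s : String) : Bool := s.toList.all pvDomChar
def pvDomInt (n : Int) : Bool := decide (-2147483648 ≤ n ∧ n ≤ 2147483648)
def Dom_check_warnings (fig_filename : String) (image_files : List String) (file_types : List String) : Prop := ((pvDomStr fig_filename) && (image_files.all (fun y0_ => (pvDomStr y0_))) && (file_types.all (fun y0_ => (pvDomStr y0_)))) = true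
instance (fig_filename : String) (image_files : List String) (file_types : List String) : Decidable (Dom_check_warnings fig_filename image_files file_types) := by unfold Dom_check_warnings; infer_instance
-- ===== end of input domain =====

-- B replaces A's imperative branch tree (whose inner any()-scan only runs over an empty
-- image_files list) with a declarative (condition, message) rule table that is filtered
-- in one pass; objective: simpler.

-- ===== PORT A =====
def check_warnings (fig_filename : String) (image_files : List String) (file_types : List String) : List String :=
  let warnings : List String := []
  let warnings := if fig_filename = "" then warnings ++ ["No .fig file found."] else warnings
  if image_files = [] then
    if file_types = [] then
      warnings ++ ["No image file types selected."]
    else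
      let missing_types : List String := file_types.foldl (fun acc ext =>
        if image_files.any (fun img => PySem.Str.endswith (PySem.Str.lower img) ext) then acc
        else acc ++ [ext]) []
      if missing_types = [] then warnings
      else
        let missing_types_str := PySem.Str.join ", "
          (missing_types.map (fun ext => "No " ++ ext ++ " files found"))
        warnings ++ [missing_types_str]
  else
    if file_types = [] then warnings ++ ["No image file types selected."]
    else warnings

-- ===== PORT B =====
def check_warnings_alt (fig_filename : String) (image_files : List String) (file_types : List String) : List String :=
  let rules : List (Bool × String) := [
    (fig_filename = "", "No .fig file found."),
    (file_types = [], "No image file types selected."),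
    (decide (file_types ≠ []) && decide (image_files = []),
      PySem.Str.join ", " (file_types.map (fun ext => "No " ++ ext ++ " files found")))]
  (rules.filter (fun r => r.1)).map (fun r => r.2)

-- ===== PRECONDITION & SPEC =====
def Spec_check_warnings (fig_filename : String) (image_files : List String) (file_types : List String) (out : List String) : Prop := out = check_warnings_alt fig_filename image_files file_types
instance (fig_filename : String) (image_files : List String) (file_types : List String) (out : List String) : Decidable (Spec_check_warnings fig_filename image_files file_types out) := by unfold Spec_check_warnings; infer_instance

-- ===== CLAIM (what is proved, stated in full; the proofs are below) =====
def Claim_equal_check_warnings : Prop := ∀ (fig_filename : String) (image_files : List String) (file_types : List String), Dom_check_warnings fig_filename image_files file_types → Spec_check_warnings fig_filename image_files file_types (check_warnings fig_filename image_files file_types)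

-- ===== LEMMAS AND PROOFS =====

-- On an empty image list the any()-scan is False, so A's foldl keeps every ext.
theorem foldl_missing_all_empty (fts : List String) (acc : List String) :
    fts.foldl (fun acc ext =>
      if ([] : List String).any (fun img => PySem.Str.endswith (PySem.Str.lower img) ext) then acc
      else acc ++ [ext]) acc = acc ++ fts := by
  induction fts generalizing acc with
  | nil => simp
  | cons e es ih =>
      rw [List.foldl_cons, if_neg (by simp), ih]
      simp [List.append_assoc]

-- ===== VERDICT (by name: the statement is the Claim_ definition above) =====
theorem check_warnings_spec : Claim_equal_check_warnings := by
  intro fig imgs fts _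
  unfold Spec_check_warnings check_warnings check_warnings_alt
  cases imgs with
  | nil =>
      cases fts with
      | nil => by_cases h : fig = "" <;> simp [h]
      | cons e es =>
          rw [foldl_missing_all_empty (e :: es) []]
          by_cases h : fig = "" <;> simp [h, List.filter]
  | cons i is =>
      cases fts <;> by_cases h : fig = "" <;> simp [h, List.filter, List.map]
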